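-- pv_equiv track=rewrite | github.com/lumogis/lumogis | orchestrator/services/deduplication.py | _build_attr_blocks
-- ===== SOURCE A (Python) =====
-- _ATTR_PREFIX_LEN = 2
--
-- def _normalise_name(name: str) -> str:
--     return (name or "").lower().strip()
--
-- def _build_attr_blocks(entities: list[dict]) -> set[tuple[str, str]]:
--     """Return candidate pairs sharing the first N chars of their normalised name."""
--     by_prefix: dict[str, list[str]] = {}
--     for e in entities:
--         norm = _normalise_name(e.get("name") or "")
--         if len(norm) < _ATTR_PREFIX_LEN:
--             continue
--         prefix = norm[:_ATTR_PREFIX_LEN]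
--         by_prefix.setdefault(prefix, []).append(str(e["entity_id"]))
--
--     pairs: set[tuple[str, str]] = set()
--     for eids in by_prefix.values():
--         eids_sorted = sorted(eids)
--         for i in range(len(eids_sorted)):
--             for j in range(i + 1, len(eids_sorted)):
--                 pairs.add((eids_sorted[i], eids_sorted[j]))
--     return pairs
-- ===== SOURCE B (Python) =====
-- _ATTR_PREFIX_LEN = 2
--
-- def _normalise_name(name: str) -> str:
--     return (name or "").lower().strip()
--
-- def _build_attr_blocks(entities):
--     """Flat keyed list + ordered-dedup of prefixes + per-prefix filtered bucket,
--     emitted head-against-rest; no dict-of-lists, no index arithmetic."""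
--     keyed = []
--     for e in entities:
--         norm = _normalise_name(e.get("name") or "")
--         if len(norm) >= _ATTR_PREFIX_LEN:
--             keyed.append((norm[:_ATTR_PREFIX_LEN], str(e["entity_id"])))
--     pairs = set()
--     for prefix in dict.fromkeys(p for p, _ in keyed):
--         bucket = sorted(eid for p, eid in keyed if p == prefix)
--         while bucket:
--             small = bucket.pop(0)
--             for large in bucket:
--                 pairs.add((small, large))
--     return pairs
-- ===== Notes on version B (the rewrite author's own statement) =====
-- stated objective: alternative
-- what changed: Replaces A's dict-of-lists grouping plus nested index-range pair loops by a flat (prefix, eid) keyed list, an ordered dedup of its prefixes, a per-prefix filtered-and-sorted bucket, and head-against-rest pair emission with a destructive pop loop.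
import Mathlib
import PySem

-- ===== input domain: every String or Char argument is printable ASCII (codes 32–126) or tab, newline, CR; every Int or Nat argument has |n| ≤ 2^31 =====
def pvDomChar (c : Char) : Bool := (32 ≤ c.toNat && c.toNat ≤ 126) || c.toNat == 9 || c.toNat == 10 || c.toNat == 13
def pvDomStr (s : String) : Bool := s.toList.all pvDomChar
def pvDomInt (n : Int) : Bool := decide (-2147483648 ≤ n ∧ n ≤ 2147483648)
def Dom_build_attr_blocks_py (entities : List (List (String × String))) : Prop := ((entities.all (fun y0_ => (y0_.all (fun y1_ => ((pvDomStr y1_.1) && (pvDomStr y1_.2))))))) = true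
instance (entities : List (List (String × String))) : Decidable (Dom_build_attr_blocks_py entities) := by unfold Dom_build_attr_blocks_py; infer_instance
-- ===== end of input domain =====

-- B replaces A's dict-of-lists grouping and index-pair loops by a flat keyed list,
-- an ordered dedup of its prefixes and a head-against-rest pair emission (objective: alternative).

-- shared helpers (both Pythons share _normalise_name; entity dicts are association lists, lookup = first match)
-- e.get("name") or "": a missing key and an empty value both give "" (getD "" covers both)
def pvGetName (e : List (String × String)) : String :=
  ((PySem.Dict.mk e).get? "name").getD ""
-- _normalise_name: (name or "").lower().strip()
def pvNorm (e : List (String × String)) : String :=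
  PySem.Str.strip (PySem.Str.lower (pvGetName e))
-- str(e["entity_id"]): values are strings, so str() is the identity; e["entity_id"] raises KeyError
-- on a missing key — Pre_ excludes that, making the total form with default "" exact
def pvEid (e : List (String × String)) : String :=
  ((PySem.Dict.mk e).get? "entity_id").getD ""

-- ===== PORT A =====
def build_attr_blocks_py (entities : List (List (String × String))) : List (String × String) :=
  let by_prefix : PySem.Dict String (List String) :=
    entities.foldl (fun d e =>
      if PySem.Str.len (pvNorm e) < 2 then d
      else d.modify (PySem.Str.slice (pvNorm e) none (some 2)) [] (fun l => l ++ [pvEid e]))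
      PySem.Dict.empty
  by_prefix.values.foldl (fun pairs eids =>
    let es := PySem.List.sorted eids (fun x => x) false
    (PySem.List.pyRange 0 (PySem.List.len es)).foldl (fun pairs i =>
      (PySem.List.pyRange (i + 1) (PySem.List.len es)).foldl (fun pairs j =>
        PySem.Set.add pairs (PySem.List.pyGetD es i "", PySem.List.pyGetD es j "")) pairs)
      pairs)
    (PySem.Set.empty)

-- ===== PORT B =====
def pvEmitRow (pairs : PySem.Set (String × String)) (small : String) (rest : List String) :
    PySem.Set (String × String) :=
  rest.foldl (fun s large => PySem.Set.add s (small, large)) pairs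

def pvEmitBucket : PySem.Set (String × String) → List String → PySem.Set (String × String)
  | pairs, [] => pairs
  | pairs, small :: rest => pvEmitBucket (pvEmitRow pairs small rest) rest

def build_attr_blocks_py_alt (entities : List (List (String × String))) : List (String × String) :=
  let keyed : List (String × String) :=
    entities.foldl (fun acc e =>
      if 2 ≤ PySem.Str.len (pvNorm e) then
        acc ++ [(PySem.Str.slice (pvNorm e) none (some 2), pvEid e)]
      else acc) []
  (PySem.List.dedup (keyed.map (·.1))).foldl (fun pairs p =>
    pvEmitBucket pairs
      (PySem.List.sorted ((keyed.filter (fun q => q.1 == p)).map (·.2)) (fun x => x) false))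
    (PySem.Set.empty)

-- ===== PRECONDITION & SPEC =====
-- Pre_ excludes exactly the inputs where Python A raises KeyError: an entity whose normalised
-- name reaches the prefix length 2 but which has no "entity_id" key.
def Pre_build_attr_blocks_py (entities : List (List (String × String))) : Prop :=
  ∀ e ∈ entities, 2 ≤ PySem.Str.len (pvNorm e) → (PySem.Dict.mk e).contains "entity_id" = true
instance (entities : List (List (String × String))) : Decidable (Pre_build_attr_blocks_py entities) := by
  unfold Pre_build_attr_blocks_py; infer_instance

def pvWitness_build_attr_blocks_py : (List (List (String × String))) :=
  [[("name", "Acme Corp"), ("entity_id", "1")],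
   [("name", " ACME "), ("entity_id", "2")],
   [("name", "x")]]

def Spec_build_attr_blocks_py (entities : List (List (String × String))) (out : List (String × String)) : Prop := out = build_attr_blocks_py_alt entities
instance (entities : List (List (String × String))) (out : List (String × String)) : Decidable (Spec_build_attr_blocks_py entities out) := by unfold Spec_build_attr_blocks_py; infer_instance

-- ===== CLAIM (what is proved, stated in full; the proofs are below) =====
def Claim_equal_build_attr_blocks_py : Prop := ∀ (entities : List (List (String × String))), Dom_build_attr_blocks_py entities → Pre_build_attr_blocks_py entities → Spec_build_attr_blocks_py entities (build_attr_blocks_py entities)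

-- ===== LEMMAS AND PROOFS =====

-- the flat keyed list both ports describe: one (prefix, eid) pair per qualifying entity
def pvK (entities : List (List (String × String))) : List (String × String) :=
  (entities.filter (fun e => decide (2 ≤ PySem.Str.len (pvNorm e)))).map
    (fun e => (PySem.Str.slice (pvNorm e) none (some 2), pvEid e))

-- B's accumulation loop builds pvK
lemma keyed_eq_pvK (entities : List (List (String × String))) :
    entities.foldl (fun acc e =>
      if 2 ≤ PySem.Str.len (pvNorm e) then
        acc ++ [(PySem.Str.slice (pvNorm e) none (some 2), pvEid e)]
      else acc) [] = pvK entities := by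
  have hfun : (fun (acc : List (String × String)) (e : List (String × String)) =>
      if 2 ≤ PySem.Str.len (pvNorm e) then
        acc ++ [(PySem.Str.slice (pvNorm e) none (some 2), pvEid e)]
      else acc)
      = (fun acc e => if (fun e => decide (2 ≤ PySem.Str.len (pvNorm e))) e = true
          then acc ++ [(fun e => (PySem.Str.slice (pvNorm e) none (some 2), pvEid e)) e]
          else acc) := by
    funext acc e
    by_cases h : 2 ≤ PySem.Str.len (pvNorm e)
    · rw [if_pos h, if_pos (by rw [decide_eq_true_eq]; exact h)]
    · rw [if_neg h, if_neg (by rw [decide_eq_true_eq]; exact h)]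
  rw [hfun, PySem.List.foldl_append_if]
  unfold pvK
  rw [List.nil_append]

-- A's dict loop is the grouping fold over pvK
lemma dict_eq_group (entities : List (List (String × String))) (d : PySem.Dict String (List String)) :
    entities.foldl (fun d e =>
      if PySem.Str.len (pvNorm e) < 2 then d
      else d.modify (PySem.Str.slice (pvNorm e) none (some 2)) [] (fun l => l ++ [pvEid e])) d
    = (pvK entities).foldl (fun d p => d.modify p.1 [] (fun l => l ++ [p.2])) d := by
  induction entities generalizing d with
  | nil => rfl
  | cons e t ih =>
    simp only [List.foldl_cons]
    by_cases h : PySem.Str.len (pvNorm e) < 2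
    · have hK : pvK (e :: t) = pvK t := by
        unfold pvK
        rw [List.filter_cons, if_neg (by rw [decide_eq_true_eq]; omega)]
      rw [hK, if_pos h]
      exact ih d
    · have hK : pvK (e :: t)
          = (PySem.Str.slice (pvNorm e) none (some 2), pvEid e) :: pvK t := by
        unfold pvK
        rw [List.filter_cons, if_pos (by rw [decide_eq_true_eq]; omega), List.map_cons]
      rw [hK, if_neg h, List.foldl_cons]
      exact ih _

-- A's double index loop over es equals B's head-against-rest emission, from any suffix
lemma outer_loop (es : List String) (k : Nat) (pairs : PySem.Set (String × String)) :
    (PySem.List.pyRange (k : Int) (PySem.List.len es)).foldl (fun pairs i =>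
      (PySem.List.pyRange (i + 1) (PySem.List.len es)).foldl (fun pairs j =>
        PySem.Set.add pairs (PySem.List.pyGetD es i "", PySem.List.pyGetD es j "")) pairs)
      pairs = pvEmitBucket pairs (es.drop k) := by
  induction hn : es.length - k generalizing k pairs with
  | zero =>
    have hk : es.length ≤ k := by omega
    rw [PySem.List.pyRange_one_eq_nil (by simp; exact_mod_cast hk)]
    simp [List.drop_of_length_le hk, pvEmitBucket]
  | succ n ih =>
    have hk : k < es.length := by omega
    rw [PySem.List.pyRange_one_cons (by simp; exact_mod_cast hk)]
    simp only [List.foldl_cons]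
    have h1 : ((k : Int) + 1) = (((k + 1 : Nat)) : Int) := by push_cast; ring
    rw [h1, PySem.List.foldl_pyRange_pyGetD es ""
      (fun pr large => PySem.Set.add pr (PySem.List.pyGetD es (k : Int) "", large)) pairs
      (by positivity)]
    have hsm : PySem.List.pyGetD es (k : Int) "" = es[k] := by
      simp [List.getElem?_eq_getElem hk]
    simp only [Int.toNat_natCast, hsm]
    rw [ih (k + 1) _ (by omega)]
    rw [List.drop_eq_getElem_cons hk, pvEmitBucket]
    rfl

-- ===== VERDICT (by name: the statement is the Claim_ definition above) =====
theorem build_attr_blocks_py_spec : Claim_equal_build_attr_blocks_py := by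
  intro entities _hdom _hpre
  show build_attr_blocks_py entities = build_attr_blocks_py_alt entities
  have hA : build_attr_blocks_py entities
      = (entities.foldl (fun d e =>
          if PySem.Str.len (pvNorm e) < 2 then d
          else d.modify (PySem.Str.slice (pvNorm e) none (some 2)) [] (fun l => l ++ [pvEid e]))
          PySem.Dict.empty).values.foldl (fun pairs eids =>
        (PySem.List.pyRange 0 (PySem.List.len (PySem.List.sorted eids (fun x => x) false))).foldl
          (fun pairs i =>
            (PySem.List.pyRange (i + 1)
                (PySem.List.len (PySem.List.sorted eids (fun x => x) false))).foldl
              (fun pairs j =>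
                PySem.Set.add pairs (PySem.List.pyGetD (PySem.List.sorted eids (fun x => x) false) i "",
                  PySem.List.pyGetD (PySem.List.sorted eids (fun x => x) false) j "")) pairs)
          pairs) PySem.Set.empty := rfl
  have hB : build_attr_blocks_py_alt entities
      = (PySem.List.dedup ((entities.foldl (fun acc e =>
            if 2 ≤ PySem.Str.len (pvNorm e) then
              acc ++ [(PySem.Str.slice (pvNorm e) none (some 2), pvEid e)]
            else acc) []).map (·.1))).foldl (fun pairs p =>
          pvEmitBucket pairs
            (PySem.List.sorted (((entities.foldl (fun acc e =>
                if 2 ≤ PySem.Str.len (pvNorm e) then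
                  acc ++ [(PySem.Str.slice (pvNorm e) none (some 2), pvEid e)]
                else acc) []).filter (fun q => q.1 == p)).map (·.2)) (fun x => x) false))
          PySem.Set.empty := rfl
  rw [hA, hB, keyed_eq_pvK, dict_eq_group]
  have hnd : ((pvK entities).foldl (fun d p => d.modify p.1 [] (fun l => l ++ [p.2]))
      PySem.Dict.empty).keys.Nodup :=
    PySem.Dict.nodup_keys_foldl_modify_key (pvK entities) (fun p => p.1) []
      (fun _ p l => l ++ [p.2]) PySem.Dict.empty (by simp)
  rw [PySem.Dict.values_eq_map_keys _ hnd [], List.foldl_map,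
    PySem.Dict.keys_foldl_modify_key (pvK entities) (fun p => p.1) []
      (fun _ p l => l ++ [p.2]) PySem.Dict.empty]
  simp only [PySem.Dict.keys_empty, PySem.Set.update_nil_left, PySem.List.dedup_eq_ofList]
  congr 1
  funext pairs p
  rw [PySem.Dict.getD_foldl_modify_append, PySem.Dict.getD_empty]
  have h0 := outer_loop (PySem.List.sorted
      ((List.filter (fun q => q.1 == p) (pvK entities)).map (fun x => x.2)) (fun x => x) false)
    0 pairs
  rw [Nat.cast_zero, List.drop_zero] at h0
  rw [List.nil_append]
  exact h0
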